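-- pv_equiv track=rewrite | github.com/Ragnarok-z/OTN_over_EON | MultilayerRSA.py | find_contiguous_blocks
-- ===== SOURCE A (Python) =====
-- from typing import List, Dict, Tuple, Set, Optional
--
-- def find_contiguous_blocks(available_fs: Set[int], required_size: int) -> List[List[int]]:
--     """Find all contiguous blocks of required_size in available_fs"""
--     if not available_fs:
--         return []
--
--     sorted_fs = sorted(available_fs)
--     blocks = []
--     current_block = [sorted_fs[0]]
--
--     for fs in sorted_fs[1:]:
--         if fs == current_block[-1] + 1:
--             current_block.append(fs)
--         else:
--             if len(current_block) >= required_size: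
--                 blocks.append(current_block)
--             current_block = [fs]
--
--     if len(current_block) >= required_size:
--         blocks.append(current_block)
--
--     return blocks
-- ===== SOURCE B (Python) =====
-- def find_contiguous_blocks(available_fs, required_size):
--     """Find all contiguous blocks of required_size in available_fs."""
--     fs_set = set(available_fs)
--     blocks = []
--     for x in sorted(fs_set):
--         if x - 1 not in fs_set:
--             run = []
--             y = x
--             while y in fs_set:
--                 run.append(y)
--                 y += 1
--             if len(run) >= required_size:
--                 blocks.append(run)
--     return blocks
-- ===== Notes on version B (the rewrite author's own statement) =====
-- stated objective: idiomatic
-- what changed: B uses the classic set-membership run detection (as in the well-known longest-consecutive-sequence idiom): x starts a run iff x-1 is not in the set, and each run is grown by probing x+1, x+2, ... for membership, instead of A's single lookback scan that compares each sorted element with the tail of a growing current-block accumulator and flushes it at breaks.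
import Mathlib
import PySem

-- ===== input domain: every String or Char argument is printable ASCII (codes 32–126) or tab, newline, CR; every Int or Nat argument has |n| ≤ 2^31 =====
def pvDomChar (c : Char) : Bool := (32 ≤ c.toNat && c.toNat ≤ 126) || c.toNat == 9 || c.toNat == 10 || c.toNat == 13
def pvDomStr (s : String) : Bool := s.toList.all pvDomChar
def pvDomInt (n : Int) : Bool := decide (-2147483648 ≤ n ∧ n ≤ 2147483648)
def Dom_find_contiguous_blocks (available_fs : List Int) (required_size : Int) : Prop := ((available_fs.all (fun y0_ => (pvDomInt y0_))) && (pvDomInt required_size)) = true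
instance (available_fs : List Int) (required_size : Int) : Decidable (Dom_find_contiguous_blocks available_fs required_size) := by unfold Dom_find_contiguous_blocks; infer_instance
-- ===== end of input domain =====

-- B replaces A's lookback accumulator scan over the sorted list by set-membership run
-- detection: x starts a run iff x-1 is not in the set, and a run is grown by probing
-- x+1, x+2, ... for membership until it fails.

-- ===== PORT A =====
-- the body of A's for-loop over sorted_fs[1:], on state (blocks, current_block)
def fcbStep (required_size : Int) (st : List (List Int) × List Int) (fs : Int) :
    List (List Int) × List Int :=
  if fs = PySem.List.pyGetD st.2 (-1) 0 + 1 then (st.1, st.2 ++ [fs])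
  else if PySem.List.len st.2 ≥ required_size then (st.1 ++ [st.2], [fs])
  else (st.1, [fs])

def find_contiguous_blocks (available_fs : List Int) (required_size : Int) : List (List Int) :=
  if available_fs = [] then []
  else
    match PySem.List.sorted available_fs (fun x => x) false with
    | [] => []  -- unreachable: sorted of a nonempty list is nonempty
    | h :: t =>
      let st := t.foldl (fcbStep required_size) ([], [h])
      if PySem.List.len st.2 ≥ required_size then st.1 ++ [st.2] else st.1

-- ===== PORT B =====
-- B's inner while loop 'while y in fs_set: run.append(y); y += 1'; the fuel only makes the
-- recursion total (the loop runs at most |fs_set| times, so fuel |fs_set|+1 is never exhausted)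
def extendRun (s : PySem.Set Int) : Nat → Int → List Int
  | 0, _ => []
  | n + 1, y => if PySem.Set.contains s y then y :: extendRun s n (y + 1) else []

-- B's outer for-loop body on accumulator blocks
def bStep (s : PySem.Set Int) (required_size : Int) (fuel : Nat)
    (blocks : List (List Int)) (x : Int) : List (List Int) :=
  if PySem.Set.contains s (x - 1) then blocks
  else
    let run := extendRun s fuel x
    if PySem.List.len run ≥ required_size then blocks ++ [run] else blocks

def find_contiguous_blocks_alt (available_fs : List Int) (required_size : Int) : List (List Int) :=
  let fs_set : PySem.Set Int := PySem.Set.ofList available_fs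
  (PySem.List.sorted fs_set (fun x => x) false).foldl
    (bStep fs_set required_size (fs_set.length + 1)) []

-- ===== PRECONDITION & SPEC =====
-- A's parameter is declared Set[int]; under the type convention a Python set is a list of
-- DISTINCT elements, so Pre_ only states that representation invariant: a list with duplicate
-- values does not denote a set.
def Pre_find_contiguous_blocks (available_fs : List Int) (required_size : Int) : Prop :=
  available_fs.Nodup
instance (available_fs : List Int) (required_size : Int) : Decidable (Pre_find_contiguous_blocks available_fs required_size) := by unfold Pre_find_contiguous_blocks; infer_instance

def pvWitness_find_contiguous_blocks : List Int × Int := ([5, 1, 2, 3], 2)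

def Spec_find_contiguous_blocks (available_fs : List Int) (required_size : Int) (out : List (List Int)) : Prop := out = find_contiguous_blocks_alt available_fs required_size
instance (available_fs : List Int) (required_size : Int) (out : List (List Int)) : Decidable (Spec_find_contiguous_blocks available_fs required_size out) := by unfold Spec_find_contiguous_blocks; infer_instance

-- ===== CLAIM (what is proved, stated in full; the proofs are below) =====
def Claim_equal_find_contiguous_blocks : Prop := ∀ (available_fs : List Int) (required_size : Int), Dom_find_contiguous_blocks available_fs required_size → Pre_find_contiguous_blocks available_fs required_size → Spec_find_contiguous_blocks available_fs required_size (find_contiguous_blocks available_fs required_size)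

-- ===== LEMMAS AND PROOFS =====

-- canonical description both programs are reduced to: cut the sorted list into maximal
-- consecutive runs, then filter the runs by size
def takeRun (x : Int) : List Int → List Int × List Int
  | [] => ([], [])
  | y :: t => if y = x + 1 then ((y :: (takeRun y t).1), (takeRun y t).2) else ([], y :: t)

theorem takeRun_rest_le (x : Int) (l : List Int) : (takeRun x l).2.length ≤ l.length := by
  induction l generalizing x with
  | nil => simp [takeRun]
  | cons y t ih =>
    simp only [takeRun]
    split
    · exact Nat.le_succ_of_le (ih y)
    · simp

def splitRuns : List Int → List (List Int)
  | [] => []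
  | x :: t => (x :: (takeRun x t).1) :: splitRuns (takeRun x t).2
termination_by l => l.length
decreasing_by
  simpa using Nat.lt_succ_of_le (takeRun_rest_le x t)

-- ---- A equals the canonical description ----

-- A's fold with a pending current block `cur` (whose last element is x), then the final flush,
-- produces exactly: the blocks so far, then the size-filtered runs of the remaining input,
-- the first run being `cur` extended as far as the consecutive chain goes.
theorem fcb_fold_eq (k : Int) (l : List Int) :
    ∀ (cur : List Int) (blocks : List (List Int)) (x : Int),
      PySem.List.pyGetD cur (-1) 0 = x → cur ≠ [] →
      (let st := l.foldl (fcbStep k) (blocks, cur)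
       if PySem.List.len st.2 ≥ k then st.1 ++ [st.2] else st.1)
      = blocks ++ ((cur ++ (takeRun x l).1) :: splitRuns (takeRun x l).2).filter
          (fun r => PySem.List.len r ≥ k) := by
  induction l with
  | nil =>
    intro cur blocks x _ _
    simp only [List.foldl_nil, takeRun, splitRuns, List.append_nil, List.filter_cons,
      List.filter_nil, PySem.List.len_eq, ge_iff_le]
    by_cases hk : k ≤ (cur.length : Int) <;> simp [hk]
  | cons y t ih =>
    intro cur blocks x hx hcur
    simp only [List.foldl_cons]
    by_cases hy : y = x + 1
    · -- extend the current block
      have hstep : fcbStep k (blocks, cur) y = (blocks, cur ++ [y]) := by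
        simp [fcbStep, hx, hy]
      rw [hstep, ih (cur ++ [y]) blocks y (PySem.List.pyGetD_neg_one_append_singleton cur y 0)
        (by simp)]
      simp only [takeRun, hy]
      simp
    · -- break: flush cur (if large enough) and restart at y
      have hstep : fcbStep k (blocks, cur) y =
          ((if PySem.List.len cur ≥ k then blocks ++ [cur] else blocks), [y]) := by
        simp only [fcbStep, hx]
        split_ifs with h1 <;> simp_all
      rw [hstep, ih [y] _ y (by simp [pysem, PySem.List.pyGetD]) (by simp)]
      have htr : takeRun x (y :: t) = ([], y :: t) := by simp [takeRun, hy]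
      rw [htr]
      simp only [List.append_nil, splitRuns, List.filter_cons, PySem.List.len_eq, ge_iff_le]
      by_cases hk : k ≤ (cur.length : Int) <;> simp [hk]

theorem a_eq_canon (fs : List Int) (k : Int) :
    find_contiguous_blocks fs k
      = (splitRuns (PySem.List.sorted fs (fun x => x) false)).filter
          (fun r => PySem.List.len r ≥ k) := by
  unfold find_contiguous_blocks
  by_cases hfs : fs = []
  · subst hfs
    simp [PySem.List.sorted, splitRuns]
  · simp only [if_neg hfs]
    have hne : PySem.List.sorted fs (fun x => x) false ≠ [] := by
      intro h
      have := PySem.List.length_sorted (xs := fs) (key := fun x => x) (rev := false)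
      rw [h] at this
      exact hfs (List.eq_nil_of_length_eq_zero this.symm)
    rcases hh : PySem.List.sorted fs (fun x => x) false with _ | ⟨h, t⟩
    · exact absurd hh hne
    · dsimp only
      rw [fcb_fold_eq k t [h] [] h (by simp [pysem, PySem.List.pyGetD]) (by simp)]
      simp [splitRuns]

-- ---- B equals the canonical description ----

theorem takeRun_split (x : Int) (t : List Int) : t = (takeRun x t).1 ++ (takeRun x t).2 := by
  induction t generalizing x with
  | nil => simp [takeRun]
  | cons y t ih =>
    simp only [takeRun]
    by_cases hy : y = x + 1
    · simp only [if_pos hy, List.cons_append]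
      exact congrArg (y :: ·) (ih y)
    · simp [hy]

-- every element of a run extension has its predecessor in the run (or it is the start)
theorem takeRun_mem_pred (t : List Int) : ∀ (x y : Int), y ∈ (takeRun x t).1 →
    y - 1 = x ∨ y - 1 ∈ (takeRun x t).1 := by
  induction t with
  | nil => intro x y h; simp [takeRun] at h
  | cons z t ih =>
    intro x y h
    simp only [takeRun] at h ⊢
    by_cases hz : z = x + 1
    · simp only [if_pos hz, List.mem_cons] at h ⊢
      rcases h with h | h
      · left; omega
      · rcases ih z y h with h' | h'
        · right; left; omega
        · right; right; exact h'
    · simp [hz] at h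
  
-- the probing loop reconstructs exactly the consecutive prefix of the remaining sorted input
theorem extend_eq (S L : List Int) (hmem : ∀ y : Int, y ∈ S ↔ y ∈ L) :
    ∀ (t : List Int) (x : Int) (P : List Int) (n : Nat),
      L = P ++ x :: t → L.Pairwise (· < ·) → t.length < n →
      extendRun S n x = x :: (takeRun x t).1 := by
  intro t
  induction t with
  | nil =>
    intro x P n hL hpw hn
    have hx : x ∈ S := (hmem x).2 (by simp [hL])
    have hx1 : x + 1 ∉ S := by
      intro h
      have h' := (hmem _).1 h
      rw [hL, List.mem_append] at h'
      rcases h' with h' | h'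
      · have := (List.pairwise_append.1 (hL ▸ hpw)).2.2 _ h' x (by simp)
        omega
      · have : x + 1 = x := by simp only [List.mem_cons, List.not_mem_nil, or_false] at h'; exact h'
        omega
    match n, hn with
    | n + 1, _ =>
      cases n with
      | zero => simp [extendRun, hx, takeRun]
      | succ m => simp [extendRun, hx, hx1, takeRun]
  | cons z t ih =>
    intro x P n hL hpw hn
    have hx : x ∈ S := (hmem x).2 (by simp [hL])
    match n, hn with
    | n + 1, hn =>
      by_cases hz : z = x + 1
      · subst hz
        have hrec := ih (x + 1) (P ++ [x]) n (by simp [hL]) hpw (by simpa using hn)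
        simp [extendRun, hx, hrec, takeRun]
      · have hx1 : x + 1 ∉ S := by
          intro h
          have h' := (hmem _).1 h
          rw [hL, List.mem_append] at h'
          have hpw' := List.pairwise_append.1 (hL ▸ hpw)
          rcases h' with h' | h'
          · have := hpw'.2.2 _ h' x (by simp); omega
          · simp only [List.mem_cons] at h'
            rcases h' with h' | h' | h'
            · omega
            · omega
            · have hc := List.pairwise_cons.1 hpw'.2.1
              have h1 := hc.1 z (by simp)
              have h2 := (List.pairwise_cons.1 hc.2).1 _ h'
              omega
        have htr : takeRun x (z :: t) = ([], z :: t) := by simp [takeRun, hz]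
        cases n with
        | zero => simp [extendRun, hx, htr]
        | succ m => simp [extendRun, hx, hx1, htr]

-- where a run stops, the next remaining element exceeds every run element by more than one
theorem takeRun_snd_head (t : List Int) : ∀ (x z : Int) (r : List Int),
    (x :: t).Pairwise (· < ·) → (takeRun x t).2 = z :: r →
    x + 1 < z ∧ ∀ y ∈ (takeRun x t).1, y + 1 < z := by
  induction t with
  | nil => intro x z r _ h; simp [takeRun] at h
  | cons y t ih =>
    intro x z r hpw h
    simp only [takeRun] at h ⊢
    by_cases hy : y = x + 1
    · simp only [if_pos hy] at h ⊢
      have hpw' : (y :: t).Pairwise (· < ·) := (List.pairwise_cons.1 hpw).2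
      obtain ⟨h1, h2⟩ := ih y z r hpw' h
      refine ⟨by omega, ?_⟩
      intro w hw
      simp only [List.mem_cons] at hw
      rcases hw with hw | hw
      · omega
      · exact h2 w hw
    · simp only [if_neg hy] at h ⊢
      obtain ⟨hz, -⟩ := List.cons.injEq .. ▸ h
      have := (List.pairwise_cons.1 hpw).1 y (by simp)
      constructor
      · omega
      · intro w hw; simp at hw

-- B's fold over a suffix u of the strictly sorted list L, whose head (if any) starts a run,
-- appends exactly the size-filtered maximal runs of u
theorem bfold_eq (S L : List Int) (k : Int) (fuel : Nat)
    (hmem : ∀ y : Int, y ∈ S ↔ y ∈ L)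
    (hpw : L.Pairwise (· < ·)) (hfuel : L.length < fuel) :
    ∀ (m : Nat) (u P : List Int) (acc : List (List Int)),
      u.length ≤ m → L = P ++ u →
      (∀ z r, u = z :: r → (z - 1) ∉ L) →
      u.foldl (bStep S k fuel) acc
        = acc ++ (splitRuns u).filter (fun r => PySem.List.len r ≥ k) := by
  intro m
  induction m with
  | zero =>
    intro u P acc hlen hL _
    have : u = [] := List.eq_nil_of_length_eq_zero (Nat.le_zero.1 hlen)
    subst this
    simp [splitRuns]
  | succ m ih =>
    intro u P acc hlen hL hstart
    rcases u with _ | ⟨x, t⟩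
    · simp [splitRuns]
    · set c := (takeRun x t).1 with hc
      set rest := (takeRun x t).2 with hrest
      have hts : t = c ++ rest := takeRun_split x t
      have hnotx : x - 1 ∉ S := by
        intro h
        exact hstart x t rfl ((hmem (x - 1)).1 h)
      have hext : extendRun S fuel x = x :: c := by
        refine extend_eq S L hmem t x P fuel hL hpw ?_
        have : t.length ≤ L.length := by
          rw [hL]; simp; omega
        omega
      have hstep : bStep S k fuel acc x =
          (if PySem.List.len (x :: c) ≥ k then acc ++ [x :: c] else acc) := by
        simp [bStep, hnotx, hext]
      -- skip all the in-run elements c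
      have hskip : ∀ (acc' : List (List Int)), c.foldl (bStep S k fuel) acc' = acc' := by
        intro acc'
        rw [PySem.List.foldl_congr_mem (g := fun acc _ => acc), PySem.List.foldl_ignore]
        intro a y hy
        have hys : y - 1 ∈ S := by
          rw [hmem]
          rcases takeRun_mem_pred t x y (hc ▸ hy) with h | h
          · rw [hL]; simp [h]
          · rw [hL, hts]
            simp only [List.mem_append, List.mem_cons]
            right; right; left; exact h
        simp [bStep, hys]
      -- the remainder rest starts a new run (or is empty)
      have hstart' : ∀ z r, rest = z :: r → (z - 1) ∉ L := by
        intro z r hzr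
        have hpwu : (x :: t).Pairwise (· < ·) := (List.pairwise_append.1 (hL ▸ hpw)).2.1
        obtain ⟨h1, h2⟩ := takeRun_snd_head t x z r hpwu hzr
        intro hzL
        rw [hL, List.mem_append] at hzL
        have hpw' := List.pairwise_append.1 (hL ▸ hpw)
        rcases hzL with h' | h'
        · have := hpw'.2.2 _ h' x (by simp); omega
        · simp only [List.mem_cons] at h'
          rcases h' with h' | h'
          · omega
          · rw [hts, hzr, List.mem_append, List.mem_cons] at h'
            rcases h' with h' | h' | h'
            · have := h2 _ h'; omega
            · omega
            · have hsub : (z :: r).Sublist L := by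
                rw [hL, hts, hzr]
                exact List.Sublist.trans
                  (List.Sublist.cons x (List.sublist_append_right c (z :: r)))
                  (List.sublist_append_right P _)
              have := (List.pairwise_cons.1 (hpw.sublist hsub)).1 _ h'
              omega
      have hL' : L = (P ++ x :: c) ++ rest := by
        rw [hL, hts]; simp
      have hlen' : rest.length ≤ m := by
        have h1 : t.length ≤ m := by simpa using hlen
        have : rest.length ≤ t.length := takeRun_rest_le x t
        omega
      calc (x :: t).foldl (bStep S k fuel) acc
          = rest.foldl (bStep S k fuel) (bStep S k fuel acc x) := by
            rw [List.foldl_cons, hts, List.foldl_append, hskip]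
        _ = bStep S k fuel acc x
              ++ (splitRuns rest).filter (fun r => PySem.List.len r ≥ k) :=
            ih rest (P ++ x :: c) _ hlen' hL' hstart'
        _ = acc ++ (splitRuns (x :: t)).filter (fun r => PySem.List.len r ≥ k) := by
            rw [hstep]
            have hsr : splitRuns (x :: t) = (x :: c) :: splitRuns rest := by
              rw [splitRuns]
            rw [hsr, List.filter_cons]
            by_cases h1 : PySem.List.len (x :: c) ≥ k
            · rw [if_pos h1, if_pos (by simpa using h1)]
              simp
            · rw [if_neg h1, if_neg (by simpa using h1)]

theorem b_eq_canon (fs : List Int) (k : Int) (hnd : fs.Nodup) :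
    find_contiguous_blocks_alt fs k
      = (splitRuns (PySem.List.sorted fs (fun x => x) false)).filter
          (fun r => PySem.List.len r ≥ k) := by
  have hof : PySem.Set.ofList fs = fs := PySem.Set.ofList_eq_self_of_nodup fs hnd
  show (PySem.List.sorted (PySem.Set.ofList fs) (fun x => x) false).foldl
      (bStep (PySem.Set.ofList fs) k ((PySem.Set.ofList fs : List Int).length + 1)) []
    = _
  rw [hof]
  have hpw : (PySem.List.sorted fs (fun x => x) false).Pairwise (· < ·) := by
    have h := PySem.List.sorted_ofList_pairwise_lt (xs := fs)
    rwa [hof] at h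
  have hmem : ∀ y : Int, y ∈ fs ↔ y ∈ PySem.List.sorted fs (fun x => x) false := by
    intro y
    exact (PySem.List.mem_sorted fs (fun x => x) false y).symm
  have hlenL : (PySem.List.sorted fs (fun x => x) false).length = fs.length :=
    PySem.List.length_sorted fs (fun x => x) false
  have hstart : ∀ z r, PySem.List.sorted fs (fun x => x) false = z :: r →
      (z - 1) ∉ PySem.List.sorted fs (fun x => x) false := by
    intro z r hzr hmem'
    rw [hzr] at hmem'
    simp only [List.mem_cons] at hmem'
    rcases hmem' with h | h
    · omega
    · have := (List.pairwise_cons.1 (hzr ▸ hpw)).1 _ h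
      omega
  have := bfold_eq fs (PySem.List.sorted fs (fun x => x) false) k (fs.length + 1)
    hmem hpw (by omega) (PySem.List.sorted fs (fun x => x) false).length
    (PySem.List.sorted fs (fun x => x) false) [] [] le_rfl rfl hstart
  simpa using this

-- ===== VERDICT (by name: the statement is the Claim_ definition above) =====
theorem find_contiguous_blocks_spec : Claim_equal_find_contiguous_blocks := by
  intro fs k _ hnd
  unfold Spec_find_contiguous_blocks
  rw [a_eq_canon, b_eq_canon fs k hnd]
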